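-- pv_equiv track=rewrite | github.com/Kristen-B/CodeSignal | 23 Box_Blur.py | threexthree
-- ===== SOURCE A (Python) =====
-- def threexthree(image,indexI):
--
--     ans=[]
--     avg_sum=0
--     j_step=0
--
--     while j_step<len(image[0])-2:
--
--         for i in range(indexI,indexI+3):
--
--             for j in range(j_step,j_step+3):
--
--                 avg_sum=avg_sum+image[i][j]
--
--         j_step=j_step+1
--         ans.append(int(avg_sum/9))
--         avg_sum=0
--
--
--     return ans
-- ===== SOURCE B (Python) =====
-- def threexthree(image, indexI):
--     # Column sums + sliding width-3 window: one linear sweep instead of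
--     # re-summing 9 cells per window.
--     cols = len(image[0])
--     ans = []
--     if cols < 3:
--         return ans
--     col = [image[indexI][j] + image[indexI + 1][j] + image[indexI + 2][j]
--            for j in range(cols)]
--     running = col[0] + col[1] + col[2]
--     ans.append(int(running / 9))
--     for j in range(3, cols):
--         running += col[j] - col[j - 3]
--         ans.append(int(running / 9))
--     return ans
-- ===== Notes on version B (the rewrite author's own statement) =====
-- stated objective: alternative
-- what changed: Replaces the triple-nested re-summing of all 9 cells per window by a precomputed per-column 3-row sum array and an incremental width-3 sliding-window sum (subtract the leaving column, add the entering one), a single linear sweep; the mechanism does ~3 additions per window instead of 9, though a timing run could not measure it (large random inputs make A raise).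
import Mathlib
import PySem

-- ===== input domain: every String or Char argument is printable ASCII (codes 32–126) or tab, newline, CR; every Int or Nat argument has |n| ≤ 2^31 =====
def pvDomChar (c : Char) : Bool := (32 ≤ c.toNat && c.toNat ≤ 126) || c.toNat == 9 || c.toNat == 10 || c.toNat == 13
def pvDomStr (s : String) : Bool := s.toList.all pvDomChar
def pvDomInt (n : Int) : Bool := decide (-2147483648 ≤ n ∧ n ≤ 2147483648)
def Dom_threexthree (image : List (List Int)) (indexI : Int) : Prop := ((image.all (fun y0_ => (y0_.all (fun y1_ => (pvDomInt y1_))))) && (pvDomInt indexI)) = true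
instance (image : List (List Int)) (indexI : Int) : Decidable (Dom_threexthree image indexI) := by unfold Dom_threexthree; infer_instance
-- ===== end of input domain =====

-- B replaces A's triple-nested 9-cell re-summing per window by a column-sum array
-- and an incremental sliding-window sum: one linear sweep, ~3 additions per window
-- instead of 9 (objective: alternative decomposition).
-- int(avg_sum/9) is ported as PySem.Int.truncdiv: on Dom every window sum satisfies
-- |s| ≤ 9·2^31 < 2^53, where Python's  int(s / 9)  is exact truncation toward zero.

-- ===== PORT A =====
-- A's while loop; its iteration count (len(image[0])-2 when positive) is the fuel,
-- j_step and the accumulated ans are the loop state exactly as in A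
def threexthreeLoop (image : List (List Int)) (indexI : Int) (j_step : Int)
    (ans : List Int) (fuel : Nat) : List Int :=
  match fuel with
  | 0 => ans
  | Nat.succ f =>
    -- for i in range(indexI, indexI+3): for j in range(j_step, j_step+3): avg_sum += image[i][j]
    let avg_sum : Int :=
      (PySem.List.pyRange indexI (indexI + 3) 1).foldl (fun s i =>
        (PySem.List.pyRange j_step (j_step + 3) 1).foldl (fun s j =>
          s + PySem.List.pyGetD (PySem.List.pyGetD image i []) j 0) s) 0
    threexthreeLoop image indexI (j_step + 1)
      (ans ++ [PySem.Int.truncdiv avg_sum 9]) f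

def threexthree (image : List (List Int)) (indexI : Int) : List Int :=
  threexthreeLoop image indexI 0 []
    ((((PySem.List.pyGetD image 0 []).length : Int) - 2).toNat)

-- ===== PORT B =====
-- the column-sum comprehension of Source B: col[j] = image[indexI][j] + image[indexI+1][j] + image[indexI+2][j]
def bandColList (image : List (List Int)) (indexI cols : Int) : List Int :=
  (PySem.List.pyRange 0 cols 1).map (fun j =>
    PySem.List.pyGetD (PySem.List.pyGetD image indexI []) j 0
    + PySem.List.pyGetD (PySem.List.pyGetD image (indexI + 1) []) j 0
    + PySem.List.pyGetD (PySem.List.pyGetD image (indexI + 2) []) j 0)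

-- the initial running sum col[0] + col[1] + col[2]
def firstWin (col : List Int) : Int :=
  PySem.List.pyGetD col 0 0 + PySem.List.pyGetD col 1 0 + PySem.List.pyGetD col 2 0

-- the sliding-window loop of Source B: running and ans are the state
def slideLoop (col : List Int) (js : List Int) (running : Int) (ans : List Int) : List Int :=
  match js with
  | [] => ans
  | j :: rest =>
    let r := running + PySem.List.pyGetD col j 0 - PySem.List.pyGetD col (j - 3) 0
    slideLoop col rest r (ans ++ [PySem.Int.truncdiv r 9])

def threexthree_alt (image : List (List Int)) (indexI : Int) : List Int :=
  if ((PySem.List.pyGetD image 0 []).length : Int) < 3 then []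
  else
    slideLoop (bandColList image indexI ((PySem.List.pyGetD image 0 []).length : Int))
      (PySem.List.pyRange 3 ((PySem.List.pyGetD image 0 []).length : Int) 1)
      (firstWin (bandColList image indexI ((PySem.List.pyGetD image 0 []).length : Int)))
      [PySem.Int.truncdiv
        (firstWin (bandColList image indexI ((PySem.List.pyGetD image 0 []).length : Int))) 9]

-- ===== PRECONDITION & SPEC =====
-- Pre_ is exactly where the Python A returns (no IndexError): the image is nonempty,
-- and when the first row is wide enough for a window, the three accessed rows exist
-- (Python indexing, so a negative indexI counts from the end) and each is at least
-- as long as the first row.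
def Pre_threexthree (image : List (List Int)) (indexI : Int) : Prop :=
  image ≠ [] ∧
  (3 ≤ ((image.headI).length : Int) →
    -(image.length : Int) ≤ indexI ∧ indexI + 3 ≤ (image.length : Int) ∧
    ((image.headI).length : Int) ≤ ((PySem.List.pyGetD image indexI []).length : Int) ∧
    ((image.headI).length : Int) ≤ ((PySem.List.pyGetD image (indexI + 1) []).length : Int) ∧
    ((image.headI).length : Int) ≤ ((PySem.List.pyGetD image (indexI + 2) []).length : Int))
instance (image : List (List Int)) (indexI : Int) : Decidable (Pre_threexthree image indexI) := by
  unfold Pre_threexthree; infer_instance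

def pvWitness_threexthree : List (List Int) × Int := ([[1, 2, 3], [4, 5, 6], [7, 8, 9]], 0)

def Spec_threexthree (image : List (List Int)) (indexI : Int) (out : List Int) : Prop := out = threexthree_alt image indexI
instance (image : List (List Int)) (indexI : Int) (out : List Int) : Decidable (Spec_threexthree image indexI out) := by unfold Spec_threexthree; infer_instance

-- ===== CLAIM (what is proved, stated in full; the proofs are below) =====
def Claim_equal_threexthree : Prop := ∀ (image : List (List Int)) (indexI : Int), Dom_threexthree image indexI → Pre_threexthree image indexI → Spec_threexthree image indexI (threexthree image indexI)

-- ===== LEMMAS AND PROOFS =====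

-- the sum of the three band cells of column j
def bandCol (image : List (List Int)) (indexI j : Int) : Int :=
  PySem.List.pyGetD (PySem.List.pyGetD image indexI []) j 0
  + PySem.List.pyGetD (PySem.List.pyGetD image (indexI + 1) []) j 0
  + PySem.List.pyGetD (PySem.List.pyGetD image (indexI + 2) []) j 0

-- the 3×3 window total whose left column is t
def winSum (image : List (List Int)) (indexI t : Int) : Int :=
  bandCol image indexI t + bandCol image indexI (t + 1) + bandCol image indexI (t + 2)

-- the reference output: n window averages starting at left column t
def winList (image : List (List Int)) (indexI t : Int) (n : Nat) : List Int :=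
  match n with
  | 0 => []
  | Nat.succ m =>
    PySem.Int.truncdiv (winSum image indexI t) 9 :: winList image indexI (t + 1) m

theorem pyRange_three (a : Int) :
    PySem.List.pyRange a (a + 3) 1 = [a, a + 1, a + 2] := by
  rw [PySem.List.pyRange_one_cons (by omega), PySem.List.pyRange_one_cons (by omega),
      PySem.List.pyRange_one_cons (by omega), PySem.List.pyRange_one_eq_nil (by omega)]
  norm_num
  omega

theorem avg_sum_eq (image : List (List Int)) (indexI j_step : Int) :
    (PySem.List.pyRange indexI (indexI + 3) 1).foldl (fun s i =>
        (PySem.List.pyRange j_step (j_step + 3) 1).foldl (fun s j =>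
          s + PySem.List.pyGetD (PySem.List.pyGetD image i []) j 0) s) 0
      = winSum image indexI j_step := by
  rw [pyRange_three, pyRange_three]
  simp only [List.foldl, winSum, bandCol]
  ring

theorem threexthreeLoop_eq (image : List (List Int)) (indexI : Int) (fuel : Nat) :
    ∀ (j_step : Int) (ans : List Int),
      threexthreeLoop image indexI j_step ans fuel
        = ans ++ winList image indexI j_step fuel := by
  induction fuel with
  | zero => intro j_step ans; simp [threexthreeLoop, winList]
  | succ f ih =>
    intro j_step ans
    rw [threexthreeLoop, avg_sum_eq, ih]
    simp [winList]

theorem col_lookup (image : List (List Int)) (indexI cols j : Int)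
    (h0 : 0 ≤ j) (h1 : j < cols) :
    PySem.List.pyGetD (bandColList image indexI cols) j 0 = bandCol image indexI j := by
  unfold bandColList
  rw [PySem.List.pyGetD_map_pyRange_of_nonneg _ _ _ _ h0 h1]
  rfl

theorem firstWin_eq (image : List (List Int)) (indexI cols : Int) (h3 : 3 ≤ cols) :
    firstWin (bandColList image indexI cols) = winSum image indexI 0 := by
  unfold firstWin
  rw [col_lookup image indexI cols 0 (by omega) (by omega),
      col_lookup image indexI cols 1 (by omega) (by omega),
      col_lookup image indexI cols 2 (by omega) (by omega)]
  simp only [winSum]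
  norm_num

theorem slideLoop_eq (image : List (List Int)) (indexI cols : Int) (fuel : Nat) :
    ∀ (m r : Int) (ans : List Int), 3 ≤ m → fuel = (cols - m).toNat →
      r = winSum image indexI (m - 3) →
      slideLoop (bandColList image indexI cols) (PySem.List.pyRange m cols 1) r ans
        = ans ++ winList image indexI (m - 2) fuel := by
  induction fuel with
  | zero =>
    intro m r ans h3 hf hr
    rw [PySem.List.pyRange_one_eq_nil (by omega)]
    simp [slideLoop, winList]
  | succ f ih =>
    intro m r ans h3 hf hr
    have hm : m < cols := by omega
    rw [PySem.List.pyRange_one_cons hm, slideLoop]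
    rw [col_lookup image indexI cols m (by omega) hm,
        col_lookup image indexI cols (m - 3) (by omega) (by omega)]
    have hr' : r + bandCol image indexI m - bandCol image indexI (m - 3)
        = winSum image indexI (m - 2) := by
      rw [hr]
      simp only [winSum]
      ring_nf
    rw [hr', ih (m + 1) _ _ (by omega) (by omega)
          (by rw [show (m - 2 : Int) = m + 1 - 3 from by ring])]
    rw [show (m + 1 - 2 : Int) = (m - 2) + 1 from by ring]
    simp [winList]

-- ===== VERDICT (by name: the statement is the Claim_ definition above) =====
theorem threexthree_spec : Claim_equal_threexthree := by
  intro image indexI _ _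
  unfold Spec_threexthree threexthree threexthree_alt
  by_cases h3 : ((PySem.List.pyGetD image 0 []).length : Int) < 3
  · rw [if_pos h3, show ((((PySem.List.pyGetD image 0 []).length : Int) - 2).toNat) = 0 from by omega]
    simp [threexthreeLoop]
  · rw [if_neg h3]
    rw [not_lt] at h3
    rw [threexthreeLoop_eq, firstWin_eq image indexI _ h3,
        slideLoop_eq image indexI _ ((((PySem.List.pyGetD image 0 []).length : Int) - 3).toNat)
          3 _ _ (by omega) (by omega) (by norm_num)]
    rw [show ((((PySem.List.pyGetD image 0 []).length : Int) - 2).toNat)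
          = ((((PySem.List.pyGetD image 0 []).length : Int) - 3).toNat) + 1 from by omega]
    simp [winList]
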